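-- pv_equiv track=rewrite | github.com/yoniyoni920/AdvancedAlgorithmsandDataStructuresonStrings | CourseProject/project/src/OPM.py | order_preserving_match
-- ===== SOURCE A (Python) =====
-- def compute_ranks(seq):
--     sorted_seq = sorted(set(seq))
--     ranks = {}
--     i = 1
--     for item in sorted_seq:
--         ranks[item] = i
--         i += 1
--     return [ranks[num] for num in seq]
--
-- def order_preserving_match(text, L,k):
--     n = len(text)
--     # Dictionary to store motifs:
--     # key = rank tuple (order-preserving representation)
--     # value = tuple(count, list of start positions, list of windows)
--     motifs = {}
--     for i in range(n - L + 1):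
--         window = text[i:i+L]
--         # Compute the order-preserving rank representation of the window
--         prefix_ranks = tuple(compute_ranks(window))
--         # If this motif has already been seen, update count, positions, and windows
--         if prefix_ranks in motifs:
--             count,positions,windows = motifs[prefix_ranks]
--             motifs[prefix_ranks] = (count + 1, positions + [i], windows + [window])
--         else:
--             motifs[prefix_ranks] = (1,[i],[window])
--     # Filter motifs that appear at least k times and return them as a list of tuples
--     recurring_motifs = [(prefix_ranks, (count, positions, windows))
--                         for prefix_ranks, (count, positions, windows) in motifs.items()
--                         if count >= k]
--     # Return the list of recurring motifs with their counts, positions, and windows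
--     return recurring_motifs
-- ===== SOURCE B (Python) =====
-- def order_preserving_match(text, L, k):
--     # Group window start positions by their dense-rank key (sort-free ranks),
--     # then materialise counts and windows once at the end.
--     groups = {}
--     for i in range(len(text) - L + 1):
--         w = text[i:i+L]
--         distinct = set(w)
--         key = tuple(1 + sum(1 for v in distinct if v < c) for c in w)
--         groups.setdefault(key, []).append(i)
--     return [(key, (len(ps), ps, [text[i:i+L] for i in ps]))
--             for key, ps in groups.items() if len(ps) >= k]
-- ===== Notes on version B (the rewrite author's own statement) =====
-- stated objective: alternative
-- what changed: Replaces the sort-and-dict helper compute_ranks with a sort-free dense rank (1 + count of distinct values strictly below each char), and the grouping dict no longer maintains (count, positions, windows) incrementally: it groups only start positions and materialises counts and window slices once at the end.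
import Mathlib
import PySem

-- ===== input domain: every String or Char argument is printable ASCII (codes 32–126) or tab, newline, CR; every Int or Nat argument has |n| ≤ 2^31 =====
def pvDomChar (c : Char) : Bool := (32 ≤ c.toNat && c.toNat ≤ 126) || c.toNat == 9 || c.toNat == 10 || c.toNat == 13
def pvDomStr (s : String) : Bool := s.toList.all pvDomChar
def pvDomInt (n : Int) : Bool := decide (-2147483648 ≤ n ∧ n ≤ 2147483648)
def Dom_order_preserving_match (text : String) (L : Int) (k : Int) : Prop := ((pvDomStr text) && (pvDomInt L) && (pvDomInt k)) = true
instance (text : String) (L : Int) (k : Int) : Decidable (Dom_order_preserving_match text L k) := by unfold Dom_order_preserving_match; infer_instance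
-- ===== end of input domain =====

-- B groups window positions by a sort-free dense-rank key and materialises counts/windows once at the end; objective: alternative (not faster).

-- ===== PORT A =====
-- compute_ranks: sorted(set(seq)), a rank dict built with a counter, then a lookup pass
def computeRanks (seq : List Char) : List Int :=
  let sortedSeq := PySem.List.sorted (PySem.Set.ofList seq) (fun x => x) false
  let ranks := (sortedSeq.foldl (fun (p : PySem.Dict Char Int × Int) item =>
      (p.1.insert item p.2, p.2 + 1)) (PySem.Dict.empty, 1)).1
  -- ranks[num]: the key is always present (num ∈ seq), so the default is never read
  seq.map (fun num => (ranks.get? num).getD 0)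

def order_preserving_match (text : String) (L : Int) (k : Int) :
    List (List Int × (Int × List Int × List String)) :=
  let cs := text.toList
  let n : Int := PySem.Str.len text
  let motifs := (PySem.List.pyRange 0 (n - L + 1) 1).foldl
    (fun (m : PySem.Dict (List Int) (Int × List Int × List String)) i =>
      let window := PySem.List.slice cs (some i) (some (i + L))
      let prefixRanks := computeRanks window
      match m.get? prefixRanks with
      | some (count, positions, windows) =>
          m.insert prefixRanks (count + 1, positions ++ [i], windows ++ [String.ofList window])
      | none => m.insert prefixRanks (1, [i], [String.ofList window]))
    PySem.Dict.empty
  motifs.items.filter (fun p => decide (k ≤ p.2.1))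

-- ===== PORT B =====
-- sort-free dense rank: 1 + number of distinct values strictly below
def denseRanks (w : List Char) : List Int :=
  let distinct := PySem.Set.ofList w
  w.map (fun c => 1 + (distinct.countP (fun v => decide (v < c)) : Int))

def order_preserving_match_alt (text : String) (L : Int) (k : Int) :
    List (List Int × (Int × List Int × List String)) :=
  let cs := text.toList
  let groups := (PySem.List.pyRange 0 (PySem.Str.len text - L + 1) 1).foldl
    (fun (g : PySem.Dict (List Int) (List Int)) i =>
      let key := denseRanks (PySem.List.slice cs (some i) (some (i + L)))
      g.insert key (g.getD key [] ++ [i]))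
    PySem.Dict.empty
  (groups.items.filter (fun p => decide (k ≤ (p.2.length : Int)))).map
    (fun p => (p.1, ((p.2.length : Int), p.2,
        p.2.map (fun i => String.ofList (PySem.List.slice cs (some i) (some (i + L)))))))

-- ===== PRECONDITION & SPEC =====
def Spec_order_preserving_match (text : String) (L : Int) (k : Int) (out : List (List Int × (Int × List Int × List String))) : Prop := out = order_preserving_match_alt text L k
instance (text : String) (L : Int) (k : Int) (out : List (List Int × (Int × List Int × List String))) : Decidable (Spec_order_preserving_match text L k out) := by unfold Spec_order_preserving_match; infer_instance

-- ===== CLAIM (what is proved, stated in full; the proofs are below) =====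
def Claim_equal_order_preserving_match : Prop := ∀ (text : String) (L : Int) (k : Int), Dom_order_preserving_match text L k → Spec_order_preserving_match text L k (order_preserving_match text L k)

-- ===== LEMMAS AND PROOFS =====

-- A's rank-dict fold leaves the binding of a key it never inserts unchanged
theorem rankFold_get?_of_not_mem (s : List Char) (d : PySem.Dict Char Int) (j : Int)
    (c : Char) (hc : c ∉ s) :
    ((s.foldl (fun (p : PySem.Dict Char Int × Int) item =>
        (p.1.insert item p.2, p.2 + 1)) (d, j)).1).get? c = d.get? c := by
  induction s generalizing d j with
  | nil => rfl
  | cons a t ih =>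
    simp only [List.mem_cons, not_or] at hc
    simp only [List.foldl_cons]
    rw [ih _ _ hc.2, PySem.Dict.get?_insert_of_ne _ _ hc.1]

-- on a strictly increasing key list, A's rank-dict fold assigns j + (#keys below c) to c
theorem rankFold_get?_of_mem (s : List Char) (hs : s.Pairwise (· < ·))
    (d : PySem.Dict Char Int) (j : Int) (c : Char) (hc : c ∈ s) :
    ((s.foldl (fun (p : PySem.Dict Char Int × Int) item =>
        (p.1.insert item p.2, p.2 + 1)) (d, j)).1).get? c
      = some (j + (s.countP (fun v => decide (v < c)) : Int)) := by
  induction s generalizing d j with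
  | nil => cases hc
  | cons a t ih =>
    have hlt : ∀ x ∈ t, a < x := by
      intro x hx; exact (List.pairwise_cons.mp hs).1 x hx
    simp only [List.foldl_cons]
    rcases List.mem_cons.mp hc with h | h
    · subst h
      have hnot : c ∉ t := fun hmem => lt_irrefl c (hlt c hmem)
      rw [rankFold_get?_of_not_mem _ _ _ _ hnot, PySem.Dict.get?_insert_self]
      have h0 : t.countP (fun v => decide (v < c)) = 0 :=
        List.countP_eq_zero.mpr (fun x hx => by
          simp only [decide_eq_true_eq]; exact not_lt_of_gt (hlt x hx))
      simp [h0]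
    · rw [ih (List.pairwise_cons.mp hs).2 _ _ h]
      have hac : a < c := hlt c h
      have : (a :: t).countP (fun v => decide (v < c))
          = t.countP (fun v => decide (v < c)) + 1 := by
        simp [hac]
      rw [this]
      congr 1
      push_cast
      ring

-- the two rank computations agree on every window
theorem ranks_eq (seq : List Char) : computeRanks seq = denseRanks seq := by
  unfold computeRanks denseRanks
  apply List.map_congr_left
  intro c hc
  have hmem : c ∈ PySem.List.sorted (PySem.Set.ofList seq) (fun x => x) false :=
    (PySem.List.mem_sorted _ _ _ _).mpr ((PySem.Set.mem_ofList _ _).mpr hc)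
  rw [rankFold_get?_of_mem _ (PySem.List.sorted_ofList_pairwise_lt seq) _ _ _ hmem]
  have hcount : (PySem.List.sorted (PySem.Set.ofList seq) (fun x => x) false).countP
      (fun v => decide (v < c)) = (PySem.Set.ofList seq).countP (fun v => decide (v < c)) :=
    (PySem.List.sorted_perm _ _ _).countP_eq _
  simp [hcount]

-- the value A stores for a key, as a function of B's position list
def valF (cs : List Char) (L : Int) (ps : List Int) : Int × List Int × List String :=
  ((ps.length : Int), ps,
    ps.map (fun i => String.ofList (PySem.List.slice cs (some i) (some (i + L)))))

-- A's motif dict as the value-wise image of B's position dict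
def liftD (cs : List Char) (L : Int) (g : PySem.Dict (List Int) (List Int)) :
    PySem.Dict (List Int) (Int × List Int × List String) :=
  PySem.Dict.mk (g.items.map (fun p => (p.1, valF cs L p.2)))

theorem get?_liftD (cs : List Char) (L : Int) (g : PySem.Dict (List Int) (List Int))
    (key : List Int) : (liftD cs L g).get? key = (g.get? key).map (valF cs L) := by
  unfold liftD PySem.Dict.get?
  rw [List.find?_map]
  simp [Function.comp_def, Option.map_map]

theorem contains_liftD (cs : List Char) (L : Int) (g : PySem.Dict (List Int) (List Int))
    (key : List Int) : (liftD cs L g).contains key = g.contains key := by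
  unfold liftD PySem.Dict.contains
  simp [List.any_map, Function.comp_def]

theorem insert_liftD (cs : List Char) (L : Int) (g : PySem.Dict (List Int) (List Int))
    (key : List Int) (v : List Int) :
    (liftD cs L g).insert key (valF cs L v) = liftD cs L (g.insert key v) := by
  apply PySem.Dict.ext
  unfold PySem.Dict.insert
  rw [contains_liftD]
  by_cases h : g.contains key = true
  · simp only [h, if_true, liftD, List.map_map]
    apply List.map_congr_left
    intro p _
    by_cases hk : p.1 = key <;> simp [hk]
  · simp only [h, if_false, Bool.false_eq_true, liftD]
    simp

-- one step of A's loop is the liftD-image of one step of B's loop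
theorem step_commute (cs : List Char) (L : Int) (g : PySem.Dict (List Int) (List Int))
    (i : Int) :
    (let window := PySem.List.slice cs (some i) (some (i + L))
     let prefixRanks := computeRanks window
     match (liftD cs L g).get? prefixRanks with
     | some (count, positions, windows) =>
         (liftD cs L g).insert prefixRanks
           (count + 1, positions ++ [i], windows ++ [String.ofList window])
     | none => (liftD cs L g).insert prefixRanks (1, [i], [String.ofList window]))
      = liftD cs L
        (let key := denseRanks (PySem.List.slice cs (some i) (some (i + L)))
         g.insert key (g.getD key [] ++ [i])) := by
  simp only [ranks_eq, get?_liftD, PySem.Dict.getD]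
  cases hg : g.get? (denseRanks (PySem.List.slice cs (some i) (some (i + L)))) with
  | none =>
      simp only [Option.map_none, Option.getD_none, List.nil_append]
      have : (1, [i], [String.ofList (PySem.List.slice cs (some i) (some (i + L)))])
          = valF cs L [i] := by simp [valF]
      rw [this, insert_liftD]
  | some ps =>
      simp only [Option.map_some, Option.getD_some, valF]
      have : ((ps.length : Int) + 1, ps ++ [i],
          ps.map (fun j => String.ofList (PySem.List.slice cs (some j) (some (j + L))))
            ++ [String.ofList (PySem.List.slice cs (some i) (some (i + L)))])
          = valF cs L (ps ++ [i]) := by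
        simp [valF]
      rw [this, insert_liftD]

-- A's whole fold is the liftD-image of B's fold
theorem fold_commute (cs : List Char) (L : Int) (is : List Int)
    (g : PySem.Dict (List Int) (List Int)) :
    (is.foldl
      (fun (m : PySem.Dict (List Int) (Int × List Int × List String)) i =>
        let window := PySem.List.slice cs (some i) (some (i + L))
        let prefixRanks := computeRanks window
        match m.get? prefixRanks with
        | some (count, positions, windows) =>
            m.insert prefixRanks (count + 1, positions ++ [i], windows ++ [String.ofList window])
        | none => m.insert prefixRanks (1, [i], [String.ofList window]))
      (liftD cs L g))
    = liftD cs L (is.foldl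
        (fun (g : PySem.Dict (List Int) (List Int)) i =>
          let key := denseRanks (PySem.List.slice cs (some i) (some (i + L)))
          g.insert key (g.getD key [] ++ [i])) g) := by
  induction is generalizing g with
  | nil => rfl
  | cons a t ih =>
    simp only [List.foldl_cons]
    rw [step_commute cs L g a]
    exact ih _

-- ===== VERDICT (by name: the statement is the Claim_ definition above) =====
theorem order_preserving_match_spec : Claim_equal_order_preserving_match := by
  intro text L k _
  unfold Spec_order_preserving_match order_preserving_match order_preserving_match_alt
  dsimp only
  have h0 : (PySem.Dict.empty : PySem.Dict (List Int) (Int × List Int × List String))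
      = liftD text.toList L PySem.Dict.empty := rfl
  rw [h0, fold_commute]
  rw [liftD]
  rw [List.filter_map]
  rfl
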